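-- pv_equiv track=rewrite | github.com/ParthPatel2000/neural_net_for_2048 | heuristics_ai.py | build_ideal_cluster_board
-- ===== SOURCE A (Python) =====
-- from typing import Dict, List, Tuple, Optional, Union
--
-- def build_ideal_cluster_board(gameboard: List[List[int]]) -> List[List[int]]:
--     """Build ideal clustering board for normalization"""
--     rows = len(gameboard)
--     cols = len(gameboard[0])
--
--     # Count tiles
--     counts = {}
--     for row in gameboard:
--         for val in row:
--             if val != 0:
--                 counts[val] = counts.get(val, 0) + 1
--
--     # Sort tile values high to low
--     tile_values = sorted(counts.keys(), reverse=True)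
--
--     # Fill board grouping identical tiles together
--     ideal = [[0] * cols for _ in range(rows)]
--     r, c = 0, 0
--
--     for val in tile_values:
--         for _ in range(counts[val]):
--             ideal[r][c] = val
--             c += 1
--             if c >= cols:
--                 c = 0
--                 r += 1
--
--     return ideal
-- ===== SOURCE B (Python) =====
-- from typing import List
--
-- def build_ideal_cluster_board(gameboard: List[List[int]]) -> List[List[int]]:
--     """Build ideal clustering board for normalization"""
--     rows = len(gameboard)
--     cols = len(gameboard[0])
--     flat = sorted((v for row in gameboard for v in row if v != 0), reverse=True)
--     flat += [0] * (rows * cols - len(flat))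
--     return [flat[i * cols:(i + 1) * cols] for i in range(rows)]
-- ===== Notes on version B (the rewrite author's own statement) =====
-- stated objective: simpler
-- what changed: Replaces the count-dict + distinct-value sort + wrap-around cursor fill with a collect-nonzeros, full descending sort, zero-pad and reshape-by-slicing pipeline (grouping equal tiles high-to-low is exactly a descending multiset sort).
import Mathlib
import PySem

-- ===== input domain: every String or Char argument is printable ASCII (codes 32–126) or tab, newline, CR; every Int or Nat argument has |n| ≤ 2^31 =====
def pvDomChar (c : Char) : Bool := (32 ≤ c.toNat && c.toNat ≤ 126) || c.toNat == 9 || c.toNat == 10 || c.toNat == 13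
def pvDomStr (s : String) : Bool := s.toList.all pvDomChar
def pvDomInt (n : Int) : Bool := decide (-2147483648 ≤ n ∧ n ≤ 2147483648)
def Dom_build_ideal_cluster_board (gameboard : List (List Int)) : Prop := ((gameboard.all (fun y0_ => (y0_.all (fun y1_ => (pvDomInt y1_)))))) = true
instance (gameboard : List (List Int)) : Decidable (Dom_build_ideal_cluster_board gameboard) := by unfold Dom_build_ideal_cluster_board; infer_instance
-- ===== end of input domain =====

-- B replaces A's count-dict + distinct-value sort + cursor fill by a collect→descending-sort→pad→reshape pipeline (objective: simpler).

-- ===== PORT A =====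
def build_ideal_cluster_board (gameboard : List (List Int)) : List (List Int) :=
  let rows := gameboard.length
  let cols := (gameboard.headD []).length          -- gameboard[0] raises IndexError on []; excluded by Pre_
  let counts : PySem.Dict Int Int :=
    gameboard.foldl (fun d row =>
      row.foldl (fun d val =>
        if val ≠ 0 then d.insert val (d.getD val 0 + 1) else d) d)
      PySem.Dict.empty
  let tile_values := PySem.List.sorted counts.keys (fun x => x) true
  let ideal := List.replicate rows (List.replicate cols (0 : Int))
  let fill := tile_values.foldl (fun (st : List (List Int) × Nat × Nat) val =>
      (PySem.List.pyRange 0 (counts.getD val 0) 1).foldl (fun st _ =>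
        let ideal := st.1
        let r := st.2.1
        let c := st.2.2
        let ideal := ideal.set r ((ideal.getD r []).set c val)   -- ideal[r][c] = val; in range under Pre_
        let c := c + 1
        if c ≥ cols then (ideal, r + 1, 0) else (ideal, r, c)) st)
    (ideal, 0, 0)
  fill.1

-- ===== PORT B =====
def build_ideal_cluster_board_alt (gameboard : List (List Int)) : List (List Int) :=
  let rows := gameboard.length
  let cols := (gameboard.headD []).length          -- gameboard[0] raises IndexError on []; excluded by Pre_
  let flat0 := PySem.List.sorted ((gameboard.flatMap id).filter (fun v => v ≠ 0)) (fun x => x) true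
  let flat := flat0 ++ List.replicate (rows * cols - flat0.length) (0 : Int)
  (List.range rows).map (fun i =>
    PySem.List.slice flat (some ((i * cols : Nat) : Int)) (some (((i + 1) * cols : Nat) : Int)))

-- ===== PRECONDITION & SPEC =====
-- Pre_ excludes exactly the inputs on which Python A raises: the empty board (gameboard[0] is an
-- IndexError) and ragged boards whose number of non-zero tiles exceeds rows*cols cells (the fill
-- cursor runs past the board and ideal[r][c] is an IndexError).
def Pre_build_ideal_cluster_board (gameboard : List (List Int)) : Prop :=
  gameboard ≠ [] ∧
  ((gameboard.flatMap id).filter (fun v => v ≠ 0)).length ≤ gameboard.length * (gameboard.headD []).length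
instance (gameboard : List (List Int)) : Decidable (Pre_build_ideal_cluster_board gameboard) := by
  unfold Pre_build_ideal_cluster_board; infer_instance
def pvWitness_build_ideal_cluster_board : List (List Int) := [[2, 0], [4, 2]]

def Spec_build_ideal_cluster_board (gameboard : List (List Int)) (out : List (List Int)) : Prop := out = build_ideal_cluster_board_alt gameboard
instance (gameboard : List (List Int)) (out : List (List Int)) : Decidable (Spec_build_ideal_cluster_board gameboard out) := by unfold Spec_build_ideal_cluster_board; infer_instance

-- ===== CLAIM (what is proved, stated in full; the proofs are below) =====
def Claim_equal_build_ideal_cluster_board : Prop := ∀ (gameboard : List (List Int)), Dom_build_ideal_cluster_board gameboard → Pre_build_ideal_cluster_board gameboard → Spec_build_ideal_cluster_board gameboard (build_ideal_cluster_board gameboard)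

-- ===== LEMMAS AND PROOFS =====
-- ===== helper definitions for the proofs =====
def pvNZ (gameboard : List (List Int)) : List Int :=
  (gameboard.flatMap id).filter (fun v => v ≠ 0)

def pvChunk (rows cols : Nat) (f : List Int) : List (List Int) :=
  (List.range rows).map (fun i => (f.drop (i * cols)).take cols)

def pvStep (cols : Nat) (st : List (List Int) × Nat × Nat) (v : Int) :
    List (List Int) × Nat × Nat :=
  let ideal := st.1.set st.2.1 ((st.1.getD st.2.1 []).set st.2.2 v)
  let c := st.2.2 + 1
  if c ≥ cols then (ideal, st.2.1 + 1, 0) else (ideal, st.2.1, c)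

-- (1) the counting loop is Counter(nonzeros)
lemma pv_counts_eq (gameboard : List (List Int)) :
    gameboard.foldl (fun d row =>
      row.foldl (fun d val =>
        if val ≠ 0 then d.insert val (d.getD val 0 + 1) else d) d)
      PySem.Dict.empty = PySem.Dict.counter (pvNZ gameboard) := by
  rw [pvNZ, ← PySem.Dict.foldl_insert_getD_add_one_eq_counter, List.foldl_filter,
    List.flatMap_id, ← List.foldl_flatten]
  congr 1
  funext d val
  by_cases h : val = 0 <;> simp [h]

-- (2) fold of the inner pyRange loop = fold over a replicate block
lemma pv_foldl_pyRange_replicate {α : Type} (body : Int → α → α) (a : Int) (n : Nat) (st : α) :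
    (PySem.List.pyRange 0 (n : Int) 1).foldl (fun s _ => body a s) st
      = (List.replicate n a).foldl (fun s v => body v s) st := by
  induction n generalizing st with
  | zero => simp
  | succ n ih =>
      rw [show ((n + 1 : Nat) : Int) = (n : Int) + 1 by push_cast; ring,
        PySem.List.pyRange_one_succ_right (by positivity), List.replicate_succ']
      simp only [List.foldl_append, List.foldl_cons, List.foldl_nil]
      rw [ih]

-- (2') A's nested fill loop is a single fold over the grouped flat list
lemma pv_fillA (cols : Nat) (cnt : Int → Nat) :
    ∀ (tv : List Int) (init : List (List Int) × Nat × Nat),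
      tv.foldl (fun st val =>
          (PySem.List.pyRange 0 ((cnt val : Nat) : Int) 1).foldl
            (fun st _ => pvStep cols st val) st) init
        = (tv.flatMap (fun v => List.replicate (cnt v) v)).foldl (pvStep cols) init := by
  intro tv
  induction tv with
  | nil => simp
  | cons v t ih =>
      intro init
      rw [List.foldl_cons, List.flatMap_cons, List.foldl_append, ih,
        pv_foldl_pyRange_replicate (fun a s => pvStep cols s a)]

-- (3) descending sort is the unique ≥-pairwise rearrangement
lemma pv_sorted_rev_id_eq (xs ys : List Int) (hp : ys.Perm xs)
    (hpw : ys.Pairwise (fun a b => b ≤ a)) :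
    PySem.List.sorted xs (fun x => x) true = ys := by
  refine List.eq_of_perm_of_sorted (fun a b _ _ h1 h2 => le_antisymm h2 h1)
    (PySem.List.sorted_pairwise_rev xs (fun x => x)) hpw
    ((PySem.List.sorted_perm xs (fun x => x) true).trans hp.symm)

-- (4) counting in a flatMap of replicate blocks over a Nodup list
lemma pv_count_flatMap_replicate (cnt : Int → Nat) (a : Int) :
    ∀ (ys : List Int), ys.Nodup →
      (ys.flatMap (fun v => List.replicate (cnt v) v)).count a
        = if a ∈ ys then cnt a else 0 := by
  intro ys
  induction ys with
  | nil => simp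
  | cons v t ih =>
      intro hnd
      rw [List.flatMap_cons, List.count_append, List.count_replicate,
        ih (List.Nodup.of_cons hnd)]
      by_cases hav : a = v
      · subst hav
        have : a ∉ t := (List.nodup_cons.mp hnd).1
        simp [this]
      · simp only [List.mem_cons, hav, false_or]
        have : ¬ v = a := fun h => hav h.symm
        simp [this]

-- (5) the grouped list is a permutation of the tiles
lemma pv_perm_flatMap (xs tv : List Int) (htv : tv.Perm (PySem.Set.ofList xs)) :
    (tv.flatMap (fun v => List.replicate (xs.count v) v)).Perm xs := by
  have hnd : tv.Nodup := htv.nodup_iff.mpr (PySem.Set.nodup_ofList xs)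
  rw [List.perm_iff_count]
  intro a
  rw [pv_count_flatMap_replicate _ a tv hnd]
  by_cases hm : a ∈ xs
  · have : a ∈ tv := htv.mem_iff.mpr ((PySem.Set.mem_ofList xs a).mpr hm)
    simp [this]
  · have : a ∉ tv := fun h => hm ((PySem.Set.mem_ofList xs a).mp (htv.mem_iff.mp h))
    simp [this, List.count_eq_zero.mpr hm]

-- (6) grouped blocks along a strictly decreasing value list are ≥-pairwise
lemma pv_pairwise_flatMap (cnt : Int → Nat) :
    ∀ (tv : List Int), tv.Pairwise (fun a b => b < a) →
      (tv.flatMap (fun v => List.replicate (cnt v) v)).Pairwise (fun a b : Int => b ≤ a) := by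
  intro tv
  induction tv with
  | nil => simp
  | cons v t ih =>
      intro hpw
      rw [List.flatMap_cons, List.pairwise_append]
      refine ⟨List.pairwise_replicate.mpr (Or.inr le_rfl), ih hpw.of_cons, ?_⟩
      intro a ha b hb
      obtain ⟨y, hy, hby⟩ := List.mem_flatMap.mp hb
      rw [List.eq_of_mem_replicate ha, List.eq_of_mem_replicate hby]
      exact le_of_lt (List.rel_of_pairwise_cons hpw hy)

-- (7) writing one cell of a chunked board = writing the flat list
lemma pv_chunk_set (rows cols r c : Nat) (f : List Int) (v : Int)
    (hlen : f.length = rows * cols) (hr : r < rows) (hc : c < cols) :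
    (pvChunk rows cols f).set r (((pvChunk rows cols f).getD r []).set c v)
      = pvChunk rows cols (f.set (cols * r + c) v) := by
  have hmc : cols * r = r * cols := Nat.mul_comm cols r
  have hk : cols * r + c < f.length := by
    have h1 : cols * (r + 1) ≤ cols * rows := Nat.mul_le_mul_left cols hr
    have h2 : cols * (r + 1) = cols * r + cols := Nat.mul_succ cols r
    have h3 : cols * rows = rows * cols := Nat.mul_comm cols rows
    omega
  have hrow : (pvChunk rows cols f).getD r [] = (f.drop (r * cols)).take cols := by
    simp [pvChunk, List.getD, hr]
  have hrowr : ((f.drop (r * cols)).take cols).set c v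
      = ((f.set (cols * r + c) v).drop (r * cols)).take cols := by
    apply List.ext_getElem?
    intro j
    simp only [List.getElem?_set, List.getElem?_take, List.getElem?_drop,
      List.length_take, List.length_drop]
    split_ifs <;> first | rfl | omega
  have hrowne : ∀ i, i ≠ r →
      (f.drop (i * cols)).take cols = ((f.set (cols * r + c) v).drop (i * cols)).take cols := by
    intro i hir
    have hne : ∀ j, j < cols → ¬ (cols * r + c = i * cols + j) := by
      intro j hj
      rcases Nat.lt_or_ge i r with h | h
      · have h5 : (i + 1) * cols ≤ r * cols := Nat.mul_le_mul_right cols h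
        have e1 : (i + 1) * cols = i * cols + cols := Nat.succ_mul i cols
        omega
      · have hri : r < i := lt_of_le_of_ne h (fun h' => hir h'.symm)
        have h5 : (r + 1) * cols ≤ i * cols := Nat.mul_le_mul_right cols hri
        have e1 : (r + 1) * cols = r * cols + cols := Nat.succ_mul r cols
        omega
    apply List.ext_getElem?
    intro j
    simp only [List.getElem?_take, List.getElem?_drop, List.getElem?_set]
    by_cases hjc : j < cols
    · simp [hjc, hne j hjc]
    · simp [hjc]
  rw [hrow]
  apply List.ext_getElem?
  intro i
  simp only [pvChunk, List.getElem?_set, List.getElem?_map, List.getElem?_range,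
    List.length_map, List.length_range]
  by_cases hi : i < rows
  · by_cases hir : r = i
    · subst hir
      simp [hi, hrowr]
    · simp [hi, hir, hrowne i (fun h => hir h.symm)]
  · have : ¬ r = i := by omega
    simp [hi, this]

-- (8) setting the first padding cell
lemma pv_set_pad (P : List Int) (v : Int) (m : Nat) (hm : 0 < m) :
    (P ++ List.replicate m (0:Int)).set P.length v
      = (P ++ [v]) ++ List.replicate (m - 1) (0:Int) := by
  rw [List.set_append]
  simp only [lt_irrefl, Nat.sub_self, if_neg (lt_irrefl P.length)]
  cases m with
  | zero => omega
  | succ m => simp [List.replicate_succ]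

-- (9) the cursor fill loop on a chunked board
lemma pv_fill_loop (rows cols : Nat) (hcols : 0 < cols) :
    ∀ (L P : List Int) (r c : Nat), c < cols → P.length = cols * r + c →
      P.length + L.length ≤ rows * cols →
      (L.foldl (pvStep cols)
        (pvChunk rows cols (P ++ List.replicate (rows * cols - P.length) 0), r, c)).1
      = pvChunk rows cols ((P ++ L) ++ List.replicate (rows * cols - P.length - L.length) 0) := by
  intro L
  induction L with
  | nil => intro P r c _ _ _; simp
  | cons v L ih =>
      intro P r c hc hPlen hle
      have hr : r < rows := by
        by_contra hge
        have h1 : cols * rows ≤ cols * r := Nat.mul_le_mul_left cols (by omega)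
        have h2 : cols * rows = rows * cols := Nat.mul_comm cols rows
        simp only [List.length_cons] at hle
        omega
      have hflen : (P ++ List.replicate (rows * cols - P.length) (0:Int)).length = rows * cols := by
        simp only [List.length_append, List.length_replicate, List.length_cons] at hle ⊢
        omega
      rw [List.foldl_cons]
      have hstep : pvStep cols (pvChunk rows cols (P ++ List.replicate (rows * cols - P.length) 0), r, c) v
          = (pvChunk rows cols ((P ++ [v]) ++ List.replicate (rows * cols - (P.length + 1)) 0),
             if c + 1 ≥ cols then (r + 1, 0) else (r, c + 1)) := by
        have hset := pv_chunk_set rows cols r c _ v hflen hr hc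
        have hpad := pv_set_pad P v (rows * cols - P.length)
          (by simp only [List.length_cons] at hle; omega)
        rw [← hPlen] at hset
        rw [hpad] at hset
        have : rows * cols - P.length - 1 = rows * cols - (P.length + 1) := by omega
        rw [this] at hset
        simp only [pvStep, hset]
        split_ifs <;> rfl
      rw [hstep]
      by_cases hcc : c + 1 ≥ cols
      · have hceq : c + 1 = cols := by omega
        rw [if_pos hcc]
        have e : cols * (r + 1) = cols * r + cols := Nat.mul_succ cols r
        have hlen2 : (P ++ [v]).length = cols * (r + 1) + 0 := by
          simp only [List.length_append, List.length_singleton]; omega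
        have hle2 : (P ++ [v]).length + L.length ≤ rows * cols := by
          simp only [List.length_cons] at hle
          simp only [List.length_append, List.length_singleton]; omega
        have hrec := ih (P ++ [v]) (r + 1) 0 hcols hlen2 hle2
        simp only [List.length_append, List.length_singleton] at hrec
        rw [hrec]
        have e2 : rows * cols - (P.length + 1) - L.length
            = rows * cols - P.length - (v :: L).length := by
          simp only [List.length_cons]; omega
        rw [e2]
        congr 1
        simp
      · rw [if_neg hcc]
        have hlen2 : (P ++ [v]).length = cols * r + (c + 1) := by
          simp only [List.length_append, List.length_singleton]; omega
        have hle2 : (P ++ [v]).length + L.length ≤ rows * cols := by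
          simp only [List.length_cons] at hle
          simp only [List.length_append, List.length_singleton]; omega
        have hrec := ih (P ++ [v]) r (c + 1) (by omega) hlen2 hle2
        simp only [List.length_append, List.length_singleton] at hrec
        rw [hrec]
        have e2 : rows * cols - (P.length + 1) - L.length
            = rows * cols - P.length - (v :: L).length := by
          simp only [List.length_cons]; omega
        rw [e2]
        congr 1
        simp

-- (10) the all-zero chunked board
lemma pv_chunk_zero (rows cols : Nat) :
    pvChunk rows cols (List.replicate (rows * cols) (0:Int))
      = List.replicate rows (List.replicate cols (0:Int)) := by
  apply List.ext_getElem?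
  intro i
  by_cases hi : i < rows
  · have h1 : i * cols + cols ≤ rows * cols := by
      have := Nat.mul_le_mul_right cols (Nat.succ_le_of_lt hi)
      simpa [Nat.succ_mul] using this
    simp only [pvChunk, List.getElem?_map, List.getElem?_range, hi, List.getElem?_replicate,
      if_pos hi, List.drop_replicate, List.take_replicate, Option.map_some]
    congr 2
    omega
  · simp [pvChunk, List.getElem?_replicate, hi]

-- ===== VERDICT (by name: the statement is the Claim_ definition above) =====
theorem build_ideal_cluster_board_spec : Claim_equal_build_ideal_cluster_board := by
  intro gameboard _ hpre
  obtain ⟨hne, hcnt⟩ := hpre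
  unfold Spec_build_ideal_cluster_board
  -- abbreviations
  have htv := PySem.List.sorted_perm (PySem.Set.ofList (pvNZ gameboard)) (fun x => x) true
  have hnd : (PySem.List.sorted (PySem.Set.ofList (pvNZ gameboard)) (fun x => x) true).Nodup :=
    htv.nodup_iff.mpr (PySem.Set.nodup_ofList _)
  have htvpw : (PySem.List.sorted (PySem.Set.ofList (pvNZ gameboard)) (fun x => x) true).Pairwise
      (fun a b => b < a) := by
    have h1 := PySem.List.sorted_pairwise_rev (PySem.Set.ofList (pvNZ gameboard)) (fun x => x)
    exact (h1.and hnd).imp (fun {a b} h => lt_of_le_of_ne h.1 (fun h' => h.2 h'.symm))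
  have hperm := pv_perm_flatMap (pvNZ gameboard) _ htv
  have hLpw := pv_pairwise_flatMap (fun v => (pvNZ gameboard).count v) _ htvpw
  have hsorted := pv_sorted_rev_id_eq (pvNZ gameboard) _ hperm hLpw
  have hA : build_ideal_cluster_board gameboard
      = (((PySem.List.sorted (PySem.Set.ofList (pvNZ gameboard)) (fun x => x) true).flatMap
            (fun v => List.replicate ((pvNZ gameboard).count v) v)).foldl
          (pvStep (gameboard.headD []).length)
          (List.replicate gameboard.length
            (List.replicate (gameboard.headD []).length 0), 0, 0)).1 := by
    simp only [build_ideal_cluster_board]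
    rw [pv_counts_eq]
    simp only [PySem.Dict.keys_counter, PySem.Dict.getD_counter]
    exact congrArg Prod.fst
      (pv_fillA (gameboard.headD []).length (fun v => (pvNZ gameboard).count v) _ _)
  have hB : build_ideal_cluster_board_alt gameboard
      = pvChunk gameboard.length (gameboard.headD []).length
          (((PySem.List.sorted (PySem.Set.ofList (pvNZ gameboard)) (fun x => x) true).flatMap
              (fun v => List.replicate ((pvNZ gameboard).count v) v))
            ++ List.replicate (gameboard.length * (gameboard.headD []).length
                - ((PySem.List.sorted (PySem.Set.ofList (pvNZ gameboard)) (fun x => x) true).flatMap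
                    (fun v => List.replicate ((pvNZ gameboard).count v) v)).length) 0) := by
    simp only [build_ideal_cluster_board_alt]
    rw [show ((gameboard.flatMap id).filter (fun v => v ≠ 0)) = pvNZ gameboard from rfl,
      hsorted]
    unfold pvChunk
    refine List.map_congr_left ?_
    intro i _
    rw [PySem.List.slice_natCast]
    have e : (i + 1) * (gameboard.headD []).length - i * (gameboard.headD []).length
        = (gameboard.headD []).length := by
      rw [Nat.succ_mul, Nat.add_sub_cancel_left]
    rw [e]
  rw [hA, hB]
  by_cases hc0 : (gameboard.headD []).length = 0
  · have hx : (pvNZ gameboard).length ≤ gameboard.length * (gameboard.headD []).length := hcnt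
    have hxs : pvNZ gameboard = [] := by
      apply List.eq_nil_of_length_eq_zero
      rw [hc0] at hx
      omega
    rw [hxs]
    have hL : (PySem.List.sorted (PySem.Set.ofList ([] : List Int)) (fun x => x) true).flatMap
        (fun v => List.replicate (List.count v ([] : List Int)) v) = [] := rfl
    rw [hL]
    have hc0' : (gameboard.head?.getD []).length = 0 := by simpa using hc0
    simp [pvChunk, hc0', List.map_const']
  · have hpos : 0 < (gameboard.headD []).length := Nat.pos_of_ne_zero hc0
    have hx : (pvNZ gameboard).length ≤ gameboard.length * (gameboard.headD []).length := hcnt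
    have hfl := pv_fill_loop gameboard.length (gameboard.headD []).length hpos
      ((PySem.List.sorted (PySem.Set.ofList (pvNZ gameboard)) (fun x => x) true).flatMap
        (fun v => List.replicate ((pvNZ gameboard).count v) v)) [] 0 0 hpos
      (by simp)
      (by simp only [List.length_nil, Nat.zero_add]; rw [hperm.length_eq]; exact hx)
    rw [show List.replicate gameboard.length
          (List.replicate (gameboard.headD []).length (0:Int))
        = pvChunk gameboard.length (gameboard.headD []).length
            ([] ++ List.replicate (gameboard.length * (gameboard.headD []).length
              - ([] : List Int).length) 0) from by simp [pv_chunk_zero]]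
    rw [hfl]
    simp
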